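-- pv_equiv track=rewrite | github.com/Krzemon/OOP | Python/lab02/main.py | process_odd_dict
-- ===== SOURCE A (Python) =====
-- def process_odd_dict(odd_dict):
--     """Tworzy nowy słownik na podstawie odd_dict."""
--     new_dict = {}
--     for key, indices in odd_dict.items():
--         if any(i % 3 == 0 for i in indices):
--             new_dict[key] = indices
--         else:
--             new_dict[key] = (max(indices), min(indices))
--     return new_dict
-- ===== SOURCE B (Python) =====
-- def _summary(indices):
--     """Residue-set membership decides the branch; one sort gives both extremes."""
--     if 0 in {i % 3 for i in indices}:
--         return indices
--     s = sorted(indices)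
--     return (s[-1], s[0])
--
--
-- def process_odd_dict(odd_dict):
--     """Tworzy nowy slownik na podstawie odd_dict (dict comprehension + helper)."""
--     return {key: _summary(indices) for key, indices in odd_dict.items()}
-- ===== Notes on version B (the rewrite author's own statement) =====
-- stated objective: alternative
-- what changed: B decides the branch by membership of 0 in the set of residues mod 3 (instead of an any-scan) and obtains the extremes as the endpoints of one sorted copy (instead of separate max()/min() scans), assembled by a dict comprehension over a helper.
-- outside the precondition, e.g. on process_odd_dict({'a': []}): A raises ValueError, B raises IndexError
import Mathlib
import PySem

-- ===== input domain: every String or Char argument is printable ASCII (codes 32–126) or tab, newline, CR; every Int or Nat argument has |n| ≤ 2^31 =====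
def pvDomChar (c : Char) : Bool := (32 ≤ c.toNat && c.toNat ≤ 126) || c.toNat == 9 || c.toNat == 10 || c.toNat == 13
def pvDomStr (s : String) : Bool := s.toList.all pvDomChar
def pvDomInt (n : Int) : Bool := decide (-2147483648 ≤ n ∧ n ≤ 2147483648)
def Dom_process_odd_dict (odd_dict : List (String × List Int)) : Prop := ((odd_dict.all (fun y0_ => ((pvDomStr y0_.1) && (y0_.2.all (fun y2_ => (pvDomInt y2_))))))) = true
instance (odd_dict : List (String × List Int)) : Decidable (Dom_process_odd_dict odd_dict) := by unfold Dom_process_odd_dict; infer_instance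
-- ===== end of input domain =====

-- B decides each branch by membership of 0 in the residue-mod-3 set and takes the extremes
-- as the endpoints of one sorted copy (a dict comprehension over a helper), instead of A's
-- any()/max()/min() scans; same return value, different decomposition.
-- The Python tuple (max, min) is encoded as the two-element list [max, min].

-- ===== PORT A =====
def process_odd_dict (odd_dict : List (String × List Int)) : List (String × List Int) :=
  (odd_dict.foldl (fun (d : PySem.Dict String (List Int)) kv =>
      if kv.2.any (fun i => PySem.Int.mod i 3 == 0) then
        d.insert kv.1 kv.2
      else
        d.insert kv.1 [(PySem.List.max? kv.2 (fun y => y)).getD 0,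
                       (PySem.List.min? kv.2 (fun y => y)).getD 0])
    PySem.Dict.empty).items

-- ===== PORT B =====
-- helper _summary: residue set, then one sort; an empty value list is outside Pre_
-- (Python B raises IndexError on s[-1] there; the port's .getD 0 is never reached on Pre_)
def pvSummary (indices : List Int) : List Int :=
  if PySem.Set.contains (PySem.Set.ofList (indices.map (fun i => PySem.Int.mod i 3))) 0 then
    indices
  else
    let s := PySem.List.sorted indices (fun y => y) false
    [(PySem.List.pyGet? s (-1)).getD 0, (PySem.List.pyGet? s 0).getD 0]

def process_odd_dict_alt (odd_dict : List (String × List Int)) : List (String × List Int) :=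
  (odd_dict.foldl (fun (d : PySem.Dict String (List Int)) kv => d.insert kv.1 (pvSummary kv.2))
    PySem.Dict.empty).items

-- ===== PRECONDITION & SPEC =====
-- Pre_ excludes inputs carrying an empty value list, on which A raises ValueError (max of an
-- empty sequence); for a duplicated key whose earlier (shadowed) occurrence is empty this is
-- slightly narrower than A's raising set, since Python's dict only keeps the last value per key.
def Pre_process_odd_dict (odd_dict : List (String × List Int)) : Prop :=
  ∀ p ∈ odd_dict, p.2 ≠ []
instance (odd_dict : List (String × List Int)) : Decidable (Pre_process_odd_dict odd_dict) := by
  unfold Pre_process_odd_dict; infer_instance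
def pvWitness_process_odd_dict : (List (String × List Int)) :=
  [("x", [1, 2]), ("y", [3, 5]), ("z", [7, 8, 10])]
def Spec_process_odd_dict (odd_dict : List (String × List Int)) (out : List (String × List Int)) : Prop := out = process_odd_dict_alt odd_dict
instance (odd_dict : List (String × List Int)) (out : List (String × List Int)) : Decidable (Spec_process_odd_dict odd_dict out) := by unfold Spec_process_odd_dict; infer_instance

-- ===== CLAIM (what is proved, stated in full; the proofs are below) =====
def Claim_equal_process_odd_dict : Prop := ∀ (odd_dict : List (String × List Int)), Dom_process_odd_dict odd_dict → Pre_process_odd_dict odd_dict → Spec_process_odd_dict odd_dict (process_odd_dict odd_dict)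

-- ===== LEMMAS AND PROOFS =====

-- the residue-set membership test equals A's any-scan
lemma pv_contains_eq_any (l : List Int) :
    PySem.Set.contains (PySem.Set.ofList (l.map (fun i => PySem.Int.mod i 3))) 0
      = l.any (fun i => PySem.Int.mod i 3 == 0) := by
  simp only [PySem.Set.contains_eq_listContains, List.contains_eq_mem, PySem.Set.mem_ofList,
    List.mem_map]
  rw [Bool.eq_iff_iff]
  simp only [decide_eq_true_eq, List.any_eq_true, beq_iff_eq]

-- in a list pairwise-sorted ascending, the last element bounds all elements from above
lemma pv_pairwise_le_getLast (l : List Int) (h : l ≠ []) (hp : l.Pairwise (· ≤ ·)) :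
    ∀ y ∈ l, y ≤ l.getLast h := by
  induction l with
  | nil => cases h rfl
  | cons x t ih =>
    intro y hy
    rcases List.mem_cons.mp hy with rfl | hyt
    · cases t with
      | nil => simp
      | cons a s =>
        rw [List.getLast_cons (by simp)]
        exact List.rel_of_pairwise_cons hp (List.getLast_mem (by simp))
    · cases t with
      | nil => cases hyt
      | cons a s =>
        rw [List.getLast_cons (by simp)]
        exact ih (by simp) hp.tail y hyt

-- per-list agreement of the two value computations (nonempty lists)
lemma pv_summary_eq (l : List Int) (h : l ≠ []) :
    (if l.any (fun i => PySem.Int.mod i 3 == 0) then l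
     else [(PySem.List.max? l (fun y => y)).getD 0, (PySem.List.min? l (fun y => y)).getD 0])
    = pvSummary l := by
  obtain ⟨x, r, rfl⟩ := List.exists_cons_of_ne_nil h
  unfold pvSummary
  rw [pv_contains_eq_any]
  by_cases hb : ((x :: r).any (fun i => PySem.Int.mod i 3 == 0)) = true
  · rw [if_pos hb, if_pos hb]
  · rw [if_neg hb, if_neg hb]
    show _ = [(PySem.List.pyGet? (PySem.List.sorted (x :: r) (fun y => y) false) (-1)).getD 0,
              (PySem.List.pyGet? (PySem.List.sorted (x :: r) (fun y => y) false) 0).getD 0]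
    have hperm : (PySem.List.sorted (x :: r) (fun y => y) false).Perm (x :: r) :=
      PySem.List.sorted_perm (x :: r) (fun y => y) false
    have hsne : PySem.List.sorted (x :: r) (fun y => y) false ≠ [] := by
      intro h0
      rw [h0] at hperm
      cases hperm.symm.eq_nil
    obtain ⟨m, t, hst⟩ := List.exists_cons_of_ne_nil hsne
    -- extremal values of the list
    have hmax := PySem.List.max?_id_cons x r
    have hmin := PySem.List.min?_id_cons x r
    have hM := PySem.List.max?_isMax hmax
    have hMmem := PySem.List.max?_mem hmax
    have hm := PySem.List.min?_isMin hmin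
    have hmmem := PySem.List.min?_mem hmin
    -- head of sorted = min
    have hhead : m = r.foldl min x := by
      have h1 : m ≤ r.foldl min x := PySem.List.key_head_sorted_le _ _ hst _ hmmem
      have h2 : r.foldl min x ≤ m := by
        apply hm
        apply hperm.mem_iff.mp
        rw [hst]
        exact List.mem_cons_self ..
      omega
    -- last of sorted = max
    have hpw : (PySem.List.sorted (x :: r) (fun y => y) false).Pairwise (· ≤ ·) :=
      PySem.List.sorted_pairwise (x :: r) (fun y => y)
    have hlast : (PySem.List.sorted (x :: r) (fun y => y) false).getLast hsne = r.foldl max x := by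
      have h1 : (PySem.List.sorted (x :: r) (fun y => y) false).getLast hsne ≤ r.foldl max x :=
        hM _ (hperm.mem_iff.mp (List.getLast_mem hsne))
      have h2 : r.foldl max x ≤ (PySem.List.sorted (x :: r) (fun y => y) false).getLast hsne :=
        pv_pairwise_le_getLast _ hsne hpw _ (hperm.mem_iff.mpr hMmem)
      omega
    rw [PySem.List.pyGet?_neg_one, List.getLast?_eq_some_getLast hsne, hlast]
    rw [show (0 : Int) = ((0 : Nat) : Int) from rfl, PySem.List.pyGet?_natCast]
    rw [hst]
    simp [hmax, hmin, hhead]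

-- folding A's per-key insertion equals folding B's, given nonempty value lists
lemma pv_fold_eq (l : List (String × List Int)) (d : PySem.Dict String (List Int))
    (h : ∀ p ∈ l, p.2 ≠ []) :
    l.foldl (fun (d : PySem.Dict String (List Int)) kv =>
        if kv.2.any (fun i => PySem.Int.mod i 3 == 0) then
          d.insert kv.1 kv.2
        else
          d.insert kv.1 [(PySem.List.max? kv.2 (fun y => y)).getD 0,
                         (PySem.List.min? kv.2 (fun y => y)).getD 0]) d
    = l.foldl (fun (d : PySem.Dict String (List Int)) kv => d.insert kv.1 (pvSummary kv.2)) d := by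
  induction l generalizing d with
  | nil => rfl
  | cons p t ih =>
    have hp : p.2 ≠ [] := h p (List.mem_cons_self ..)
    have hstep : (if p.2.any (fun i => PySem.Int.mod i 3 == 0) then d.insert p.1 p.2
        else d.insert p.1 [(PySem.List.max? p.2 (fun y => y)).getD 0,
                           (PySem.List.min? p.2 (fun y => y)).getD 0])
        = d.insert p.1 (pvSummary p.2) := by
      rw [← pv_summary_eq p.2 hp]
      split <;> rfl
    simp only [List.foldl, hstep]
    exact ih _ (fun q hq => h q (List.mem_cons_of_mem _ hq))

-- ===== VERDICT (by name: the statement is the Claim_ definition above) =====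
theorem process_odd_dict_spec : Claim_equal_process_odd_dict := by
  intro odd_dict _ hpre
  unfold Spec_process_odd_dict process_odd_dict process_odd_dict_alt
  rw [pv_fold_eq odd_dict PySem.Dict.empty hpre]
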